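-- pv_equiv track=rewrite | github.com/ums-1994/Lukens | scripts/fixes/fix_indentation.py | fix_indentation_and_remove_sqlite
-- ===== SOURCE A (Python) =====
-- def fix_indentation_and_remove_sqlite(content):
--     lines = content.split('\n')
--     result = []
--     i = 0
--
--     while i < len(lines):
--         line = lines[i]
--
--         # Check if this is an else: block (indicates we still have SQLite code)
--         if line.strip().startswith('else:'):
--             # Find the indentation of this else
--             else_indent = len(line) - len(line.lstrip())
--
--             # Skip this else line and all lines in its block
--             i += 1
--             while i < len(lines):
--                 next_line = lines[i]
--                 if not next_line.strip():  # Empty line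
--                     i += 1
--                     continue
--
--                 next_indent = len(next_line) - len(next_line.lstrip())
--
--                 # If we find a line at or before the else indentation, we're out of the block
--                 if next_indent <= else_indent:
--                     break
--
--                 i += 1
--             continue
--
--         # Check if line has over-indentation (starts with 12+ spaces after try:)
--         # Over-indented lines are those that should be dedented by 4 spaces
--         if line.startswith('            ') and not line.strip().startswith(('#', 'try:', 'except', 'finally')):
--             # Check if this is inside a function/try block that needs dedenting
--             # We need to be careful not to break legitimate nested structures
--
--             # Check if the next few lines also have this over-indentation
--             # This is likely a side effect of removing the if statement
--             if i + 1 < len(lines) and not lines[i].strip().startswith('return'):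
--                 # Dedent by 4 spaces
--                 dedented = line[4:] if line.startswith('            ') else line
--                 result.append(dedented)
--                 i += 1
--                 continue
--
--         # Check for get_sqlite_conn calls and skip those lines
--         if 'get_sqlite_conn' in line:
--             i += 1
--             continue
--
--         result.append(line)
--         i += 1
--
--     return '\n'.join(result)
-- ===== SOURCE B (Python) =====
-- def fix_indentation_and_remove_sqlite(content):
--     lines = content.split('\n')
--     n = len(lines)
--     # pass 1: tabulate per-line facts (index, line, stripped, indent)
--     facts = [(i, ln, ln.strip(), len(ln) - len(ln.lstrip()))
--              for i, ln in enumerate(lines)]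
--     # pass 2: survivors of else-block stripping
--     keep = []
--     threshold = None
--     for i, ln, s, d in facts:
--         if threshold is not None:
--             if not s:
--                 continue
--             if d > threshold:
--                 continue
--             threshold = None
--         if s.startswith('else:'):
--             threshold = d
--         else:
--             keep.append((i, ln, s))
--     # pass 3: dedent over-indented survivors, drop sqlite lines
--     out = []
--     for i, ln, s in keep:
--         if (ln.startswith('            ')
--                 and not s.startswith(('#', 'try:', 'except', 'finally'))
--                 and i + 1 < n
--                 and not s.startswith('return')):
--             out.append(ln[4:])
--         elif 'get_sqlite_conn' not in ln:
--             out.append(ln)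
--     return '\n'.join(out)
-- ===== Notes on version B (the rewrite author's own statement) =====
-- stated objective: alternative
-- what changed: Replaces A's single index-jumping while loop with a nested block-skipping inner while by three staged passes: tabulate per-line facts (line, stripped, indent), filter out the else-blocks to get a survivor list, then map/filter the survivors with the dedent and sqlite rules.
import Mathlib
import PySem

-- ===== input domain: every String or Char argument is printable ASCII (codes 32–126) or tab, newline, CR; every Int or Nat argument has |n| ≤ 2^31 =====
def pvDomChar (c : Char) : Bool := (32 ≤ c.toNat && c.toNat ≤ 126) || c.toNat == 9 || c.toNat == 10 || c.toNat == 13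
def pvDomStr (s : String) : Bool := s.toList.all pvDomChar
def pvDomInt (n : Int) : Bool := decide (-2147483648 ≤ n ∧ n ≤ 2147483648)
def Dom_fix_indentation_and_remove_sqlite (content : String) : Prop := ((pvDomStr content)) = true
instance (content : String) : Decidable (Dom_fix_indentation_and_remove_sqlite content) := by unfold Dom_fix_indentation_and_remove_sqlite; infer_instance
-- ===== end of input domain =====

-- B replaces A's single index-jumping loop (with a nested block-skipping while) by three staged
-- passes: tabulate per-line facts, filter the survivors of else-block stripping, then transform
-- the survivors (simpler decomposition, same cost).

-- shared line predicates (each is a literal port of the corresponding Python test)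
def pvBlank (s : String) : Bool := (PySem.Str.strip s).toList.isEmpty
def pvIndent (s : String) : Int := PySem.Str.len s - PySem.Str.len (PySem.Str.lstrip s)
def pvIsElse (s : String) : Bool := PySem.Str.startswith (PySem.Str.strip s) "else:"
def pvTwelve (s : String) : Bool := PySem.Str.startswith s "            "
def pvCommentish (s : String) : Bool :=
  PySem.Str.startswith (PySem.Str.strip s) "#" || PySem.Str.startswith (PySem.Str.strip s) "try:" ||
  PySem.Str.startswith (PySem.Str.strip s) "except" || PySem.Str.startswith (PySem.Str.strip s) "finally"
def pvReturnish (s : String) : Bool := PySem.Str.startswith (PySem.Str.strip s) "return"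
def pvSqlite (s : String) : Bool := PySem.Str.isIn "get_sqlite_conn" s

-- ===== PORT A =====
-- A's inner `while`: skip lines of the else block, return the index where the outer loop resumes
-- (fuel = a totality guard only: every call passes enough fuel for the scan to finish on its own tests)
def skipA (lines : List String) (elseIndent : Int) : Nat → Nat → Nat
  | 0, i => i
  | fuel + 1, i =>
    if _h : i < lines.length then
      if pvBlank lines[i] then skipA lines elseIndent fuel (i + 1)
      else if pvIndent lines[i] ≤ elseIndent then i
      else skipA lines elseIndent fuel (i + 1)
    else i

-- A's outer `while` over the index i, accumulating result (fuel likewise only a totality guard)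
def loopA (lines : List String) : Nat → Nat → List String → List String
  | 0, _, result => result
  | fuel + 1, i, result =>
    if _h : i < lines.length then
      if pvIsElse lines[i] then
        loopA lines fuel (skipA lines (pvIndent lines[i]) (lines.length - i) (i + 1)) result
      else if pvTwelve lines[i] && !pvCommentish lines[i] && decide (i + 1 < lines.length) && !pvReturnish lines[i] then
        -- Python's redundant ternary `line[4:] if line.startswith(...) else line`, ported literally
        loopA lines fuel (i + 1) (result ++ [if pvTwelve lines[i] then PySem.Str.slice lines[i] (some 4) none else lines[i]])
      else if pvSqlite lines[i] then loopA lines fuel (i + 1) result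
      else loopA lines fuel (i + 1) (result ++ [lines[i]])
    else result

def fix_indentation_and_remove_sqlite (content : String) : String :=
  PySem.Str.join "\n"
    (loopA ((PySem.Str.split? content "\n").getD []) (((PySem.Str.split? content "\n").getD []).length + 1) 0 [])

-- ===== PORT B =====
-- pass 1: per-line facts (index, line, stripped, indent)
def factsB (lines : List String) : List (Int × String × String × Int) :=
  (PySem.List.enumerate lines 0).map (fun p => (p.1, p.2, PySem.Str.strip p.2, pvIndent p.2))

-- pass 2, fall-through part of the loop body (the else:/keep decision)
def norm2 (i : Int) (ln s : String) (d : Int) (ks : List (Int × String × String)) :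
    Option Int × List (Int × String × String) :=
  if PySem.Str.startswith s "else:" then (some d, ks) else (none, ks ++ [(i, ln, s)])

-- pass 2, one loop iteration: state = (threshold, keep)
def step2 (st : Option Int × List (Int × String × String)) (f : Int × String × String × Int) :
    Option Int × List (Int × String × String) :=
  match st.1 with
  | some e =>
      if f.2.2.1.toList.isEmpty then st
      else if e < f.2.2.2 then st
      else norm2 f.1 f.2.1 f.2.2.1 f.2.2.2 st.2
  | none => norm2 f.1 f.2.1 f.2.2.1 f.2.2.2 st.2

-- pass 3, one loop iteration over a survivor (i, ln, s)
def step3 (n : Int) (out : List String) (k : Int × String × String) : List String :=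
  if pvTwelve k.2.1 &&
      !(PySem.Str.startswith k.2.2 "#" || PySem.Str.startswith k.2.2 "try:" ||
        PySem.Str.startswith k.2.2 "except" || PySem.Str.startswith k.2.2 "finally") &&
      decide (k.1 + 1 < n) && !PySem.Str.startswith k.2.2 "return" then
    out ++ [PySem.Str.slice k.2.1 (some 4) none]
  else if PySem.Str.isIn "get_sqlite_conn" k.2.1 then out
  else out ++ [k.2.1]

def fix_indentation_and_remove_sqlite_alt (content : String) : String :=
  PySem.Str.join "\n"
    ((List.foldl step2 (none, []) (factsB ((PySem.Str.split? content "\n").getD []))).2.foldl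
      (step3 ((((PySem.Str.split? content "\n").getD []).length : Nat) : Int)) [])

-- ===== PRECONDITION & SPEC =====
def Spec_fix_indentation_and_remove_sqlite (content : String) (out : String) : Prop := out = fix_indentation_and_remove_sqlite_alt content
instance (content : String) (out : String) : Decidable (Spec_fix_indentation_and_remove_sqlite content out) := by unfold Spec_fix_indentation_and_remove_sqlite; infer_instance

-- ===== CLAIM (what is proved, stated in full; the proofs are below) =====
def Claim_equal_fix_indentation_and_remove_sqlite : Prop := ∀ (content : String), Dom_fix_indentation_and_remove_sqlite content → Spec_fix_indentation_and_remove_sqlite content (fix_indentation_and_remove_sqlite content)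

-- ===== LEMMAS AND PROOFS =====
-- pass 2's keep accumulator only ever grows by appending on the right
theorem acc2 (l : List (Int × String × String × Int)) :
    ∀ (th : Option Int) (ks : List (Int × String × String)),
      List.foldl step2 (th, ks) l
      = ((List.foldl step2 (th, []) l).1, ks ++ (List.foldl step2 (th, []) l).2) := by
  induction l with
  | nil => intro th ks; simp
  | cons f l ih =>
    intro th ks
    cases hP : step2 (th, []) f with
    | mk a b =>
      have hstep : ∀ ks', step2 (th, ks') f = (a, ks' ++ b) := by
        intro ks'
        cases th <;> simp only [step2, norm2] at hP ⊢ <;> split_ifs at hP ⊢ <;> simp_all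
      rw [List.foldl_cons, List.foldl_cons, hstep, hstep, List.nil_append,
          ih a (ks ++ b), ih a b]
      simp [List.append_assoc]

-- at or past the end of the list, both sides are just `out`
theorem loopA_stop (lines : List String) (f i : Nat) (out : List String) (h : lines.length ≤ i) :
    loopA lines f i out = out := by
  cases f with
  | zero => rfl
  | succ f => simp only [loopA]; rw [dif_neg (by omega)]

theorem skipA_ge (lines : List String) (e : Int) (f : Nat) : ∀ i, i ≤ skipA lines e f i := by
  induction f with
  | zero => intro i; exact le_refl i
  | succ f ih =>
    intro i
    simp only [skipA]
    split
    · split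
      · exact le_trans (Nat.le_succ i) (ih (i + 1))
      · split
        · exact le_refl i
        · exact le_trans (Nat.le_succ i) (ih (i + 1))
    · exact le_refl i

theorem skipA_le (lines : List String) (e : Int) (f : Nat) :
    ∀ i, i ≤ lines.length → skipA lines e f i ≤ lines.length := by
  induction f with
  | zero => intro i h; exact h
  | succ f ih =>
    intro i h
    simp only [skipA]
    split
    · split
      · exact ih (i + 1) (by omega)
      · split
        · exact h
        · exact ih (i + 1) (by omega)
    · exact h

theorem skipA_stop (lines : List String) (e : Int) (f i : Nat) (h : lines.length ≤ i) :
    skipA lines e f i = i := by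
  cases f with
  | zero => rfl
  | succ f => simp only [skipA]; rw [dif_neg (by omega)]

-- with enough fuel the exact fuel value is irrelevant
theorem skipA_fuel (lines : List String) (e : Int) (f1 : Nat) :
    ∀ f2 i, lines.length ≤ i + f1 → lines.length ≤ i + f2 →
      skipA lines e f1 i = skipA lines e f2 i := by
  induction f1 with
  | zero => intro f2 i h1 h2; exact (skipA_stop lines e f2 i (by omega)).symm
  | succ f ih =>
    intro f2 i h1 h2
    by_cases hi : i < lines.length
    · cases f2 with
      | zero => omega
      | succ f2 =>
        simp only [skipA]
        rw [dif_pos hi, dif_pos hi]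
        split_ifs with hb hle
        · exact ih f2 (i + 1) (by omega) (by omega)
        · rfl
        · exact ih f2 (i + 1) (by omega) (by omega)
    · rw [skipA_stop lines e _ i (by omega), skipA_stop lines e _ i (by omega)]

theorem loopA_fuel (lines : List String) (f1 : Nat) :
    ∀ f2 i out, lines.length < i + f1 → lines.length < i + f2 →
      loopA lines f1 i out = loopA lines f2 i out := by
  induction f1 with
  | zero => intro f2 i out h1 h2; rw [loopA_stop lines 0 i out (by omega), loopA_stop lines f2 i out (by omega)]
  | succ f ih =>
    intro f2 i out h1 h2
    by_cases hi : i < lines.length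
    · cases f2 with
      | zero => omega
      | succ f2 =>
        simp only [loopA]
        rw [dif_pos hi, dif_pos hi]
        split_ifs with h1' h2' h3'
        · apply ih f2 <;>
            (have := skipA_ge lines (pvIndent lines[i]) (lines.length - i) (i + 1); omega)
        all_goals apply ih f2 (i + 1) <;> omega
    · rw [loopA_stop lines _ i out (by omega), loopA_stop lines _ i out (by omega)]

theorem end_case (lines : List String) (i : Nat) (st : Option Int) (out : List String)
    (hge : lines.length ≤ i) :
    List.foldl (step3 (lines.length : Int)) out
      (List.foldl step2 (st, [])
        ((PySem.List.enumerate (lines.drop i) (i : Int)).map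
          (fun p => (p.1, p.2, PySem.Str.strip p.2, pvIndent p.2)))).2
    = (match st with
       | none => loopA lines (lines.length + 1 - i) i out
       | some e => loopA lines (lines.length + 1 - skipA lines e (lines.length - i) i)
                     (skipA lines e (lines.length - i) i) out) := by
  rw [List.drop_eq_nil_of_le hge, PySem.List.enumerate_nil, List.map_nil, List.foldl_nil,
      List.foldl_nil]
  cases st with
  | none => rw [loopA_stop lines _ i out hge]
  | some e =>
    show out = loopA lines (lines.length + 1 - skipA lines e (lines.length - i) i)
        (skipA lines e (lines.length - i) i) out
    rw [skipA_stop lines e _ i hge, loopA_stop lines _ i out hge]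

theorem main_invariant (lines : List String) :
    ∀ (k i : Nat) (st : Option Int) (out : List String), lines.length ≤ i + k →
      List.foldl (step3 (lines.length : Int)) out
        (List.foldl step2 (st, [])
          ((PySem.List.enumerate (lines.drop i) (i : Int)).map
            (fun p => (p.1, p.2, PySem.Str.strip p.2, pvIndent p.2)))).2
      = (match st with
         | none => loopA lines (lines.length + 1 - i) i out
         | some e => loopA lines (lines.length + 1 - skipA lines e (lines.length - i) i)
                       (skipA lines e (lines.length - i) i) out) := by
  intro k
  induction k with
  | zero => intro i st out hle; exact end_case lines i st out (by omega)
  | succ k ih =>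
    intro i st out hle
    by_cases hi : i < lines.length
    · have hdrop : lines.drop i = lines[i] :: lines.drop (i + 1) :=
        List.drop_eq_getElem_cons hi
      have hcast : (i : Int) + 1 = ((i + 1 : Nat) : Int) := by push_cast; ring
      rw [hdrop, PySem.List.enumerate_cons, List.map_cons, List.foldl_cons, hcast]
      set f : Int × String × String × Int :=
        ((i : Int), lines[i], PySem.Str.strip lines[i], pvIndent lines[i]) with hf
      -- processing line i in the normal (no-threshold) state agrees with one unfolding of loopA
      have hnormal : ∀ out' : List String,
          List.foldl (step3 (lines.length : Int)) out'
            (List.foldl step2 (norm2 (i : Int) lines[i] (PySem.Str.strip lines[i]) (pvIndent lines[i]) [])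
              ((PySem.List.enumerate (lines.drop (i + 1)) ((i + 1 : Nat) : Int)).map
                (fun p => (p.1, p.2, PySem.Str.strip p.2, pvIndent p.2)))).2
          = loopA lines (lines.length + 1 - i) i out' := by
        intro out'
        rw [show lines.length + 1 - i = (lines.length - i) + 1 from by omega]
        simp only [loopA]
        rw [dif_pos hi]
        by_cases h1 : pvIsElse lines[i] = true
        · rw [if_pos h1]
          unfold norm2
          rw [if_pos (by simpa [pvIsElse] using h1)]
          refine (ih (i + 1) (some (pvIndent lines[i])) out' (by omega)).trans ?_
          show loopA lines
              (lines.length + 1 - skipA lines (pvIndent lines[i]) (lines.length - (i + 1)) (i + 1))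
              (skipA lines (pvIndent lines[i]) (lines.length - (i + 1)) (i + 1)) out'
            = loopA lines (lines.length - i)
              (skipA lines (pvIndent lines[i]) (lines.length - i) (i + 1)) out'
          have hskip : skipA lines (pvIndent lines[i]) (lines.length - (i + 1)) (i + 1)
              = skipA lines (pvIndent lines[i]) (lines.length - i) (i + 1) :=
            skipA_fuel lines (pvIndent lines[i]) _ _ _ (by omega) (by omega)
          rw [hskip]
          have hge' := skipA_ge lines (pvIndent lines[i]) (lines.length - i) (i + 1)
          have hle' := skipA_le lines (pvIndent lines[i]) (lines.length - i) (i + 1) (by omega)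
          exact loopA_fuel lines _ _ _ out' (by omega) (by omega)
        · rw [if_neg h1]
          unfold norm2
          rw [if_neg (by simpa [pvIsElse] using h1)]
          rw [acc2 _ none ([] ++ [((i : Int), lines[i], PySem.Str.strip lines[i])])]
          rw [List.nil_append, List.foldl_append, List.foldl_cons, List.foldl_nil]
          have hst3 : step3 (lines.length : Int) out' ((i : Int), lines[i], PySem.Str.strip lines[i])
              = (if pvTwelve lines[i] && !pvCommentish lines[i] && decide (i + 1 < lines.length) && !pvReturnish lines[i] then
                   out' ++ [PySem.Str.slice lines[i] (some 4) none]
                 else if pvSqlite lines[i] then out' else out' ++ [lines[i]]) := by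
            have hcond : decide ((i : Int) + 1 < (lines.length : Int)) = decide (i + 1 < lines.length) := by
              apply decide_eq_decide.mpr; omega
            simp only [step3, pvCommentish, pvReturnish, pvSqlite, pvTwelve, hcond]
            split_ifs <;> rfl
          rw [hst3]
          have hfuel : lines.length + 1 - (i + 1) = lines.length - i := by omega
          by_cases h2 : (pvTwelve lines[i] && !pvCommentish lines[i] && decide (i + 1 < lines.length) && !pvReturnish lines[i]) = true
          · have h12 : pvTwelve lines[i] = true := by
              simp only [Bool.and_eq_true] at h2; exact h2.1.1.1
            rw [if_pos h2, if_pos h2, if_pos h12, ih (i + 1) none _ (by omega), hfuel]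
          · rw [if_neg h2, if_neg h2]
            by_cases h3 : pvSqlite lines[i] = true
            · rw [if_pos h3, if_pos h3, ih (i + 1) none out' (by omega), hfuel]
            · rw [if_neg h3, if_neg h3, ih (i + 1) none _ (by omega), hfuel]
      cases st with
      | none => exact hnormal out
      | some e =>
        show List.foldl (step3 (lines.length : Int)) out
            (List.foldl step2 (step2 (some e, []) f) _).2
          = loopA lines (lines.length + 1 - skipA lines e (lines.length - i) i)
              (skipA lines e (lines.length - i) i) out
        have hfe : lines.length - i = (lines.length - (i + 1)) + 1 := by omega
        by_cases hb : pvBlank lines[i] = true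
        · have hstep : step2 (some e, ([] : List (Int × String × String))) f = (some e, []) := by
            simp only [step2, hf]
            rw [if_pos (by simpa [pvBlank] using hb)]
          rw [hstep, ih (i + 1) (some e) out (by omega)]
          have hsk : skipA lines e (lines.length - i) i
              = skipA lines e (lines.length - (i + 1)) (i + 1) := by
            rw [hfe]; simp only [skipA]; rw [dif_pos hi, if_pos hb]
          rw [hsk]
        · by_cases hlt : e < pvIndent lines[i]
          · have hstep : step2 (some e, ([] : List (Int × String × String))) f = (some e, []) := by
              simp only [step2, hf]
              rw [if_neg (by simpa [pvBlank] using hb), if_pos hlt]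
            rw [hstep, ih (i + 1) (some e) out (by omega)]
            have hsk : skipA lines e (lines.length - i) i
                = skipA lines e (lines.length - (i + 1)) (i + 1) := by
              rw [hfe]; simp only [skipA]
              rw [dif_pos hi, if_neg hb, if_neg (by omega : ¬ pvIndent lines[i] ≤ e)]
            rw [hsk]
          · have hstep : step2 (some e, ([] : List (Int × String × String))) f
                = norm2 (i : Int) lines[i] (PySem.Str.strip lines[i]) (pvIndent lines[i]) [] := by
              simp only [step2, hf]
              rw [if_neg (by simpa [pvBlank] using hb), if_neg hlt]
            have hsk : skipA lines e (lines.length - i) i = i := by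
              rw [hfe]; simp only [skipA]
              rw [dif_pos hi, if_neg hb, if_pos (by omega : pvIndent lines[i] ≤ e)]
            rw [hstep, hsk]
            exact hnormal out
    · exact end_case lines i st out (by omega)

-- ===== VERDICT (by name: the statement is the Claim_ definition above) =====
theorem fix_indentation_and_remove_sqlite_spec : Claim_equal_fix_indentation_and_remove_sqlite := by
  intro content _
  unfold Spec_fix_indentation_and_remove_sqlite fix_indentation_and_remove_sqlite
    fix_indentation_and_remove_sqlite_alt factsB
  have h := main_invariant ((PySem.Str.split? content "\n").getD [])
    ((PySem.Str.split? content "\n").getD []).length 0 none [] (by omega)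
  simp only [List.drop_zero, Nat.cast_zero, Nat.sub_zero] at h
  rw [h]
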